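-- pv_equiv track=rewrite | github.com/Halias3422/evolutionSim | src/population/population.py | scanAdjacentTilesForTarget
-- ===== SOURCE A (Python) =====
-- def scanAdjacentTilesForTarget(currPosition, targetName, mapRepresentation):
--     mapSizeY = len(mapRepresentation)
--     mapSizeX = len(mapRepresentation[0])
--
--     startY = currPosition[0]
--     if (currPosition[0] - 1 >= 0):
--         startY = currPosition[0] - 1
--     endY = currPosition[0]
--     if (currPosition[0] + 1 < mapSizeY):
--         endY = currPosition[0] + 1
--     startX = currPosition[1]
--     if (currPosition[1] - 1 >= 0):
--         startX = currPosition[1] - 1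
--     endX = currPosition[1]
--     if (currPosition[1] + 1 < mapSizeX):
--         endX = currPosition[1] + 1
--
--     while (startY <= endY):
--         loopStartX = startX
--         while (loopStartX <= endX):
--             if (mapRepresentation[startY][loopStartX] == targetName
--                 and (loopStartX != currPosition[1] or startY != currPosition[0])):
--                 return ([startY, loopStartX])
--             loopStartX += 1
--         startY += 1
--     return None
-- ===== SOURCE B (Python) =====
-- def scanAdjacentTilesForTarget(currPosition, targetName, mapRepresentation):
--     cy, cx = currPosition[0], currPosition[1]
--     height = len(mapRepresentation)
--     width = len(mapRepresentation[0])
--     if not (0 <= cy < height and 0 <= cx < width):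
--         raise IndexError("currPosition is outside the map")
--     for y, row in enumerate(mapRepresentation):
--         if abs(y - cy) > 1:
--             continue
--         for x, name in enumerate(row[:width]):
--             if abs(x - cx) <= 1 and (y, x) != (cy, cx) and name == targetName:
--                 return [y, x]
--     return None
-- ===== Notes on version B (the rewrite author's own statement) =====
-- stated objective: alternative
-- what changed: A computes a clamped 3x3 bounding window (startY/endY/startX/endX) and walks it with two nested while loops; B never computes a window: after validating that the position is on the map it scans the whole map with enumerate and filters every tile by Chebyshev distance <= 1 from the position (skipping rows outside the band), trading A's O(1) window walk for a distance-predicate scan of the grid.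
-- outside the precondition, e.g. on scanAdjacentTilesForTarget([-1, 0], 'T', [['.', '.'], ['.', 'T']]): A returns [-1, 1], B raises IndexError
import Mathlib
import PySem

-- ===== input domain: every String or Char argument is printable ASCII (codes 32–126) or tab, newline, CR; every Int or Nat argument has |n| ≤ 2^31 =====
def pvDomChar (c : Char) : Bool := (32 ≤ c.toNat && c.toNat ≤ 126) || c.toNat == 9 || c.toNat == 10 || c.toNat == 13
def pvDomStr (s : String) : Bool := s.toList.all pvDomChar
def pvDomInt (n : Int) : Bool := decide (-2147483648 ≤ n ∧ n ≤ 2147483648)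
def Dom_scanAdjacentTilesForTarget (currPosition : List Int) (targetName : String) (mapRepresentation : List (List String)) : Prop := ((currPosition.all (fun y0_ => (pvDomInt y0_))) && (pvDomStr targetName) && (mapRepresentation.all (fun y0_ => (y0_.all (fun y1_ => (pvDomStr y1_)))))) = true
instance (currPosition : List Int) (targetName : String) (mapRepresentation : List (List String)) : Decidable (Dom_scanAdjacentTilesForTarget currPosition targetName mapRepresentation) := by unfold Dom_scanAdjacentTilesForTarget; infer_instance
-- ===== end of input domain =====

-- B replaces A's clamped 3×3-window computation (startY/endY/startX/endX state and two
-- nested while loops over the window) by a scan of the WHOLE map that filters every tile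
-- by Chebyshev distance ≤ 1 from the position; return values proved equal on Pre_.

-- ===== PORT A =====
-- mapRepresentation[y][x] as A's inner loop reads it (negative indices wrap, none = IndexError)
def pvLookup (m : List (List String)) (y x : Int) : Option String :=
  (PySem.List.pyGet? m y).bind (fun row => PySem.List.pyGet? row x)

-- inner 'while (loopStartX <= endX)' loop of A
def pvInnerA (m : List (List String)) (t : String) (cy cx y : Int) (x endX : Int) : Option (List Int) :=
  if _h : x ≤ endX then
    if pvLookup m y x = some t ∧ (x ≠ cx ∨ y ≠ cy) then some [y, x]
    else pvInnerA m t cy cx y (x + 1) endX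
  else none
termination_by (endX + 1 - x).toNat
decreasing_by omega

-- outer 'while (startY <= endY)' loop of A
def pvOuterA (m : List (List String)) (t : String) (cy cx startX endX : Int) (y endY : Int) : Option (List Int) :=
  if _h : y ≤ endY then
    match pvInnerA m t cy cx y startX endX with
    | some r => some r
    | none => pvOuterA m t cy cx startX endX (y + 1) endY
  else none
termination_by (endY + 1 - y).toNat
decreasing_by omega

def scanAdjacentTilesForTarget (currPosition : List Int) (targetName : String) (mapRepresentation : List (List String)) : Option (List Int) :=
  let mapSizeY : Int := mapRepresentation.length
  match PySem.List.pyGet? mapRepresentation 0 with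
  | none => none  -- IndexError on empty map (excluded by Pre_)
  | some row0 =>
    let mapSizeX : Int := row0.length
    match PySem.List.pyGet? currPosition 0, PySem.List.pyGet? currPosition 1 with
    | some cy, some cx =>
      let startY := if cy - 1 ≥ 0 then cy - 1 else cy
      let endY := if cy + 1 < mapSizeY then cy + 1 else cy
      let startX := if cx - 1 ≥ 0 then cx - 1 else cx
      let endX := if cx + 1 < mapSizeX then cx + 1 else cx
      pvOuterA mapRepresentation targetName cy cx startX endX startY endY
    | _, _ => none  -- IndexError on short currPosition (excluded by Pre_)

-- ===== PORT B =====
-- body of B's inner for-loop: one tile (x, name) of a scanned row y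
def pvCellB (cy cx : Int) (t : String) (y x : Int) (name : String) : Option (List Int) :=
  if |x - cx| ≤ 1 ∧ (y, x) ≠ (cy, cx) ∧ name = t then some [y, x] else none

-- B's inner 'for x, name in enumerate(row[:width])'; row[:width] with width = len(m[0]) ≥ 0 is List.take
def pvRowB (cy cx : Int) (t : String) (w : Nat) (y : Int) (row : List String) : Option (List Int) :=
  (PySem.List.enumerate (row.take w) 0).findSome? (fun p => pvCellB cy cx t y p.1 p.2)

def scanAdjacentTilesForTarget_alt (currPosition : List Int) (targetName : String) (mapRepresentation : List (List String)) : Option (List Int) :=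
  match PySem.List.pyGet? currPosition 0 with
  | none => none  -- IndexError on short currPosition (excluded by Pre_)
  | some cy =>
    match PySem.List.pyGet? currPosition 1 with
    | none => none  -- IndexError on short currPosition (excluded by Pre_)
    | some cx =>
      match PySem.List.pyGet? mapRepresentation 0 with
      | none => none  -- IndexError on empty map (excluded by Pre_)
      | some row0 =>
        if 0 ≤ cy ∧ cy < (mapRepresentation.length : Int) ∧ 0 ≤ cx ∧ cx < (row0.length : Int) then
          (PySem.List.enumerate mapRepresentation 0).findSome? (fun p =>
            if 1 < |p.1 - cy| then none  -- 'continue' on rows outside the band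
            else pvRowB cy cx targetName row0.length p.1 p.2)
        else none  -- B raises IndexError on an off-map position (excluded by Pre_)

-- ===== PRECONDITION & SPEC =====
-- Pre_ excludes inputs where A raises (empty map, a position list shorter than 2, a scanned
-- window row too short for the scanned columns) and off-map positions, where A either raises
-- or accidentally scans wrapped rows/columns via Python's negative-index wraparound while
-- B's distance filter never looks at wrapped indices.
def Pre_scanAdjacentTilesForTarget (currPosition : List Int) (targetName : String) (mapRepresentation : List (List String)) : Prop :=
  2 ≤ currPosition.length ∧ mapRepresentation ≠ [] ∧
  0 ≤ currPosition.headD 0 ∧ currPosition.headD 0 < (mapRepresentation.length : Int) ∧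
  0 ≤ currPosition.tail.headD 0 ∧
  currPosition.tail.headD 0 < ((mapRepresentation.headD []).length : Int) ∧
  (∀ i ∈ ([currPosition.headD 0 - 1, currPosition.headD 0, currPosition.headD 0 + 1] : List Int),
    0 ≤ i → i < (mapRepresentation.length : Int) →
    (if currPosition.tail.headD 0 + 1 < ((mapRepresentation.headD []).length : Int)
      then currPosition.tail.headD 0 + 1 else currPosition.tail.headD 0)
      < ((mapRepresentation.getD i.toNat []).length : Int))
instance (currPosition : List Int) (targetName : String) (mapRepresentation : List (List String)) : Decidable (Pre_scanAdjacentTilesForTarget currPosition targetName mapRepresentation) := by unfold Pre_scanAdjacentTilesForTarget; infer_instance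

def pvWitness_scanAdjacentTilesForTarget : List Int × String × List (List String) :=
  ([1, 1], "a", [["a", "b"], ["b", "a"]])

def Spec_scanAdjacentTilesForTarget (currPosition : List Int) (targetName : String) (mapRepresentation : List (List String)) (out : Option (List Int)) : Prop := out = scanAdjacentTilesForTarget_alt currPosition targetName mapRepresentation
instance (currPosition : List Int) (targetName : String) (mapRepresentation : List (List String)) (out : Option (List Int)) : Decidable (Spec_scanAdjacentTilesForTarget currPosition targetName mapRepresentation out) := by unfold Spec_scanAdjacentTilesForTarget; infer_instance

-- ===== CLAIM (what is proved, stated in full; the proofs are below) =====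
def Claim_equal_scanAdjacentTilesForTarget : Prop := ∀ (currPosition : List Int) (targetName : String) (mapRepresentation : List (List String)), Dom_scanAdjacentTilesForTarget currPosition targetName mapRepresentation → Pre_scanAdjacentTilesForTarget currPosition targetName mapRepresentation → Spec_scanAdjacentTilesForTarget currPosition targetName mapRepresentation (scanAdjacentTilesForTarget currPosition targetName mapRepresentation)

-- ===== LEMMAS AND PROOFS =====

-- the guard A's inner loop tests for one cell
def pvGuardA (m : List (List String)) (t : String) (cy cx y x : Int) : Option (List Int) :=
  if pvLookup m y x = some t ∧ (x ≠ cx ∨ y ≠ cy) then some [y, x] else none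

lemma pvInnerA_eq (m : List (List String)) (t : String) (cy cx y endX : Int) :
    ∀ (n : Nat) (x : Int), (endX + 1 - x).toNat = n →
      pvInnerA m t cy cx y x endX
        = (PySem.List.pyRange x (endX + 1) 1).findSome? (pvGuardA m t cy cx y) := by
  intro n
  induction n with
  | zero =>
    intro x h
    rw [pvInnerA, PySem.List.pyRange_one_eq_nil (by omega)]
    simp only [List.findSome?_nil]
    rw [dif_neg (by omega)]
  | succ k ih =>
    intro x h
    rw [pvInnerA, dif_pos (by omega), PySem.List.pyRange_one_cons (show x < endX + 1 by omega)]
    simp only [List.findSome?_cons]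
    by_cases hc : pvLookup m y x = some t ∧ (x ≠ cx ∨ y ≠ cy)
    · rw [if_pos hc]
      have hg : pvGuardA m t cy cx y x = some [y, x] := by rw [pvGuardA, if_pos hc]
      rw [hg]
    · rw [if_neg hc]
      have hg : pvGuardA m t cy cx y x = none := by rw [pvGuardA, if_neg hc]
      rw [hg]
      simpa using ih (x + 1) (by omega)

lemma pvOuterA_eq (m : List (List String)) (t : String) (cy cx startX endX endY : Int) :
    ∀ (n : Nat) (y : Int), (endY + 1 - y).toNat = n →
      pvOuterA m t cy cx startX endX y endY
        = (PySem.List.pyRange y (endY + 1) 1).findSome?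
            (fun yy => (PySem.List.pyRange startX (endX + 1) 1).findSome? (pvGuardA m t cy cx yy)) := by
  intro n
  induction n with
  | zero =>
    intro y h
    rw [pvOuterA, PySem.List.pyRange_one_eq_nil (show endY + 1 ≤ y by omega)]
    simp only [List.findSome?_nil]
    rw [dif_neg (by omega)]
  | succ k ih =>
    intro y h
    rw [pvOuterA, dif_pos (by omega), PySem.List.pyRange_one_cons (show y < endY + 1 by omega)]
    simp only [List.findSome?_cons]
    rw [pvInnerA_eq m t cy cx y endX (endX + 1 - startX).toNat startX rfl]
    cases hres : (PySem.List.pyRange startX (endX + 1) 1).findSome? (pvGuardA m t cy cx y) with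
    | some r => rfl
    | none => simpa using ih (y + 1) (by omega)

-- the clamped window [startC, endC] of A equals the candidate list filtered to bounds
lemma pvClampRange (c n : Int) (h0 : 0 ≤ c) (h1 : c < n) :
    PySem.List.pyRange (if c - 1 ≥ 0 then c - 1 else c) ((if c + 1 < n then c + 1 else c) + 1) 1
      = ([c - 1, c, c + 1].filter (fun v => decide (0 ≤ v ∧ v < n))) := by
  by_cases h2 : c - 1 ≥ 0 <;> by_cases h3 : c + 1 < n
  · rw [if_pos h2, if_pos h3,
      PySem.List.pyRange_one_cons (show c - 1 < c + 1 + 1 by omega),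
      PySem.List.pyRange_one_cons (show c - 1 + 1 < c + 1 + 1 by omega),
      PySem.List.pyRange_one_cons (show c - 1 + 1 + 1 < c + 1 + 1 by omega),
      PySem.List.pyRange_one_eq_nil (by omega)]
    simp only [List.filter_cons, List.filter_nil, decide_eq_true_eq]
    split_ifs <;> simp_all <;> omega
  · rw [if_pos h2, if_neg h3,
      PySem.List.pyRange_one_cons (show c - 1 < c + 1 by omega),
      PySem.List.pyRange_one_cons (show c - 1 + 1 < c + 1 by omega),
      PySem.List.pyRange_one_eq_nil (by omega)]
    simp only [List.filter_cons, List.filter_nil, decide_eq_true_eq]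
    split_ifs <;> simp_all <;> omega
  · rw [if_neg h2, if_pos h3,
      PySem.List.pyRange_one_cons (show c < c + 1 + 1 by omega),
      PySem.List.pyRange_one_cons (show c + 1 < c + 1 + 1 by omega),
      PySem.List.pyRange_one_eq_nil (by omega)]
    simp only [List.filter_cons, List.filter_nil, decide_eq_true_eq]
    split_ifs <;> simp_all <;> omega
  · rw [if_neg h2, if_neg h3,
      PySem.List.pyRange_one_cons (show c < c + 1 by omega),
      PySem.List.pyRange_one_eq_nil (by omega)]
    simp only [List.filter_cons, List.filter_nil, decide_eq_true_eq]
    split_ifs <;> simp_all <;> omega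

lemma pvFindSome?_congr {α β : Type} (l : List α) (f g : α → Option β)
    (h : ∀ a ∈ l, f a = g a) : l.findSome? f = l.findSome? g := by
  induction l with
  | nil => rfl
  | cons a l ih =>
    simp only [List.findSome?_cons, h a (by simp)]
    cases g a with
    | some b => rfl
    | none => exact ih (fun a ha => h a (by simp [ha]))

lemma pvSortedExt (l1 l2 : List Int) (h1 : l1.Pairwise (·<·)) (h2 : l2.Pairwise (·<·))
    (h : ∀ a, a ∈ l1 ↔ a ∈ l2) : l1 = l2 := by
  have n1 : l1.Nodup := h1.imp (fun hl => ne_of_lt hl)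
  have n2 : l2.Nodup := h2.imp (fun hl => ne_of_lt hl)
  have hp : l1.Perm l2 := (List.perm_ext_iff_of_nodup n1 n2).mpr h
  exact hp.eq_of_pairwise (fun a b _ _ hab hba => le_antisymm hab hba)
    (h1.imp (fun hl => le_of_lt hl)) (h2.imp (fun hl => le_of_lt hl))

-- the indices of range(H) at Chebyshev distance ≤ 1 from c are the three candidates, in order
lemma pvFilterBand (c H : Int) :
    (PySem.List.pyRange 0 H).filter (fun j => decide (|j - c| ≤ 1))
      = [c - 1, c, c + 1].filter (fun v => decide (0 ≤ v ∧ v < H)) := by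
  apply pvSortedExt
  · exact (PySem.List.pairwise_lt_pyRange_one 0 H).filter _
  · have hbase : ([c - 1, c, c + 1] : List Int).Pairwise (·<·) := by
      constructor
      · intro b hb
        rcases (by simpa using hb : b = c ∨ b = c + 1) with h | h <;> omega
      constructor
      · intro b hb
        have : b = c + 1 := by simpa using hb
        omega
      · simp
    exact hbase.filter _
  · intro a
    simp only [List.mem_filter, PySem.List.mem_pyRange_one, decide_eq_true_eq,
      List.mem_cons, List.not_mem_nil, or_false, abs_le]
    omega

lemma pvFindSome?_filter {α β : Type} (l : List α) (p : α → Bool) (f : α → Option β) :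
    (l.filter p).findSome? f = l.findSome? (fun a => if p a then f a else none) := by
  induction l with
  | nil => rfl
  | cons a l ih =>
    by_cases hp : p a
    · simp only [List.filter_cons, hp, if_true, List.findSome?_cons, ih]
    · simp only [List.filter_cons, hp, if_false, List.findSome?_cons, ih, Bool.false_eq_true]

-- a scan over range(H) whose body ignores indices outside the band collapses to the candidates
lemma pvBandFindSome? {β : Type} (c H : Int) (F : Int → Option β)
    (hF : ∀ j, 1 < |j - c| → F j = none) :
    (PySem.List.pyRange 0 H).findSome? F
      = ([c - 1, c, c + 1].filter (fun v => decide (0 ≤ v ∧ v < H))).findSome? F := by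
  rw [← pvFilterBand c H, pvFindSome?_filter]
  apply pvFindSome?_congr
  intro j _
  by_cases h : |j - c| ≤ 1
  · simp [h]
  · simp only [h, decide_false, Bool.false_eq_true, if_false]
    exact hF j (not_le.mp h)

-- one scanned row of B equals A's inner window scan of that row
lemma pvRowB_eq (m : List (List String)) (t : String) (cy cx v : Int) (w : Nat)
    (hv0 : 0 ≤ v) (hv1 : v < (m.length : Int)) (hx0 : 0 ≤ cx) (hx1 : cx < (w : Int))
    (hlen : (if cx + 1 < (w : Int) then cx + 1 else cx) < ((m[v.toNat]'(by omega)).length : Int)) :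
    pvRowB cy cx t w v (m[v.toNat]'(by omega))
      = ([cx - 1, cx, cx + 1].filter (fun u => decide (0 ≤ u ∧ u < (w : Int)))).findSome?
          (pvGuardA m t cy cx v) := by
  rw [pvRowB, PySem.List.enumerate_eq_map_pyRange _ "", List.findSome?_map]
  rw [show PySem.List.len ((m[v.toNat]'(by omega)).take w)
        = ((min w (m[v.toNat]'(by omega)).length : Nat) : Int) by
      simp [PySem.List.len, List.length_take]]
  rw [pvBandFindSome? cx _ _ (by
    intro u hu
    simp only [Function.comp_apply, pvCellB]
    rw [if_neg]
    rintro ⟨h1, _⟩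
    exact absurd h1 (not_le.mpr hu))]
  have hfil : [cx - 1, cx, cx + 1].filter
        (fun u => decide (0 ≤ u ∧ u < ((min w (m[v.toNat]'(by omega)).length : Nat) : Int)))
      = [cx - 1, cx, cx + 1].filter (fun u => decide (0 ≤ u ∧ u < (w : Int))) := by
    apply List.filter_congr
    intro u hu
    have hu3 : u = cx - 1 ∨ u = cx ∨ u = cx + 1 := by simpa using hu
    rw [decide_eq_decide]
    by_cases hcap : cx + 1 < (w : Int)
    · rw [if_pos hcap] at hlen
      rcases hu3 with h | h | h <;> subst h <;> omega
    · rw [if_neg hcap] at hlen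
      rcases hu3 with h | h | h <;> subst h <;> omega
  rw [hfil]
  apply pvFindSome?_congr
  intro u hu
  obtain ⟨hu3, hcond⟩ := List.mem_filter.mp hu
  simp only [decide_eq_true_eq] at hcond
  have hu3' : u = cx - 1 ∨ u = cx ∨ u = cx + 1 := by simpa using hu3
  have hurow : u < ((m[v.toNat]'(by omega)).length : Int) := by
    by_cases hcap : cx + 1 < (w : Int)
    · rw [if_pos hcap] at hlen
      rcases hu3' with h | h | h <;> subst h <;> omega
    · rw [if_neg hcap] at hlen
      rcases hu3' with h | h | h <;> subst h <;> omega
  simp only [Function.comp_apply]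
  rw [PySem.List.pyGetD_eq_getElem _ "" hcond.1 (by
    simp only [List.length_take]
    push_cast
    omega)]
  simp only [List.getElem_take]
  have hlook : pvLookup m v u = some ((m[v.toNat]'(by omega))[u.toNat]'(by omega)) := by
    rw [pvLookup, PySem.List.pyGet?_eq_some_getElem m hv0 hv1, Option.bind_some,
      PySem.List.pyGet?_eq_some_getElem _ hcond.1 hurow]
  have hband : |u - cx| ≤ 1 := by
    rw [abs_le]
    rcases hu3' with h | h | h <;> subst h <;> omega
  rw [pvCellB, pvGuardA, hlook]
  by_cases hc : (m[v.toNat]'(by omega))[u.toNat]'(by omega) = t ∧ (u ≠ cx ∨ v ≠ cy)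
  · have hpne : (v, u) ≠ (cy, cx) := by
      intro heq
      rcases hc.2 with h | h
      · exact h (Prod.ext_iff.mp heq).2
      · exact h (Prod.ext_iff.mp heq).1
    rw [if_pos ⟨hband, hpne, hc.1⟩, if_pos ⟨by rw [hc.1], hc.2⟩]
  · rw [if_neg, if_neg]
    · intro hcon
      obtain ⟨hl, hr⟩ := hcon
      exact hc ⟨Option.some.injEq .. ▸ hl, hr⟩
    · intro hcon
      obtain ⟨_, hne, heq⟩ := hcon
      refine hc ⟨heq, ?_⟩
      by_cases hux : u = cx
      · right; intro hvy; exact hne (by rw [hux, hvy])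
      · left; exact hux


-- ===== VERDICT (by name: the statement is the Claim_ definition above) =====
theorem scanAdjacentTilesForTarget_spec : Claim_equal_scanAdjacentTilesForTarget := by
  intro p t m _hdom hpre
  obtain ⟨hlen, hne, hy0, hy1, hx0, hx1, hwin⟩ := hpre
  cases m with
  | nil => exact absurd rfl hne
  | cons r0 mr =>
  cases p with
  | nil => simp at hlen
  | cons cy p1 =>
  cases p1 with
  | nil => simp at hlen
  | cons cx pr =>
  simp only [List.headD_cons, List.tail_cons] at hy0 hy1 hx0 hx1 hwin
  have hp1 : PySem.List.pyGet? (cy :: cx :: pr) 1 = some cx := by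
    simp [PySem.List.pyGet?, PySem.List.pyIdx?]
  show scanAdjacentTilesForTarget (cy :: cx :: pr) t (r0 :: mr)
      = scanAdjacentTilesForTarget_alt (cy :: cx :: pr) t (r0 :: mr)
  rw [scanAdjacentTilesForTarget, scanAdjacentTilesForTarget_alt]
  simp only [PySem.List.pyGet?_zero_cons, hp1]
  rw [if_pos (show 0 ≤ cy ∧ cy < ((r0 :: mr).length : Int) ∧ 0 ≤ cx ∧ cx < (r0.length : Int) from ⟨hy0, hy1, hx0, hx1⟩)]
  -- A-side: unfold the two while loops into window scans over the clamped ranges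
  rw [pvOuterA_eq (r0 :: mr) t cy cx _ _ _ _ _ rfl]
  rw [pvClampRange cy (((r0 :: mr).length : Int)) hy0 hy1]
  simp only [pvClampRange cx ((r0.length : Int)) hx0 hx1]
  -- B-side: enumerate = range-indexed reads, then collapse the banded scan to the candidates
  rw [PySem.List.enumerate_eq_map_pyRange (r0 :: mr) [], List.findSome?_map]
  rw [show PySem.List.len (r0 :: mr) = (((r0 :: mr).length : Int)) from rfl]
  rw [pvBandFindSome? cy (((r0 :: mr).length : Int)) _
      (by intro j hj; simp only [Function.comp_apply]; rw [if_pos hj])]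
  symm
  apply pvFindSome?_congr
  intro v hv
  obtain ⟨hv3, hcond⟩ := List.mem_filter.mp hv
  simp only [decide_eq_true_eq] at hcond
  have hv3' : v = cy - 1 ∨ v = cy ∨ v = cy + 1 := by simpa using hv3
  have hband : ¬ (1 < |v - cy|) := by
    rw [not_lt, abs_le]; rcases hv3' with h | h | h <;> subst h <;> omega
  simp only [Function.comp_apply, if_neg hband]
  rw [PySem.List.pyGetD_eq_getElem (r0 :: mr) [] hcond.1 (by exact_mod_cast hcond.2)]
  have hw := hwin v hv3 hcond.1 (by exact_mod_cast hcond.2)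
  have hvlt : v.toNat < (r0 :: mr).length := by omega
  rw [List.getD_eq_getElem _ _ hvlt] at hw
  exact pvRowB_eq (r0 :: mr) t cy cx v r0.length hcond.1 (by exact_mod_cast hcond.2) hx0 hx1 hw
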